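-- pv_equiv track=rewrite | github.com/kolokolone/CartoPharma | backend/app/services/pharmacy_directory_import.py | _normalize_csv_row
-- ===== SOURCE A (Python) =====
-- import unicodedata
--
-- def _normalize_csv_row(row: dict[str, str | None]) -> dict[str, str | None]:
--     normalized_row: dict[str, str | None] = {}
--     for key, value in row.items():
--         cleaned_key = _clean_text(key)
--         if cleaned_key is None:
--             continue
--         normalized_row[_normalize_key(cleaned_key)] = _clean_text(value)
--     return normalized_row
--
-- def _normalize_key(value: str) -> str:
--     normalized = unicodedata.normalize("NFKD", value)
--     ascii_value = normalized.encode("ascii", "ignore").decode("ascii")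
--     cleaned = []
--     previous_was_separator = False
--     for character in ascii_value.lower():
--         if character.isalnum():
--             cleaned.append(character)
--             previous_was_separator = False
--             continue
--         if not previous_was_separator:
--             cleaned.append("_")
--             previous_was_separator = True
--     result = "".join(cleaned).strip("_")
--     return result.replace("__", "_")
--
-- def _clean_text(value: str | None) -> str | None:
--     if value is None:
--         return None
--     cleaned = value.replace("\ufeff", "").replace("\x00", "").strip()
--     return cleaned or None
-- ===== SOURCE B (Python) =====
-- import re
-- import unicodedata
--
-- def _normalize_csv_row(row):
--     return {
--         _slug(cleaned_key): _clean_text(value)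
--         for key, value in row.items()
--         if (cleaned_key := _clean_text(key)) is not None
--     }
--
-- def _slug(value):
--     ascii_value = unicodedata.normalize("NFKD", value).encode("ascii", "ignore").decode("ascii")
--     return "_".join(re.findall(r"[a-z0-9]+", ascii_value.lower()))
--
-- def _clean_text(value):
--     if value is None:
--         return None
--     cleaned = value.replace("\ufeff", "").replace("\x00", "").strip()
--     return cleaned or None
-- ===== Notes on version B (the rewrite author's own statement) =====
-- stated objective: idiomatic
-- what changed: The stateful per-character key loop (previous_was_separator flag, strip('_') and the redundant '__'->'_' replace) is replaced by extracting the maximal [a-z0-9] runs (re.findall) and joining them with '_', and the row loop becomes a dict comprehension.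
import Mathlib
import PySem

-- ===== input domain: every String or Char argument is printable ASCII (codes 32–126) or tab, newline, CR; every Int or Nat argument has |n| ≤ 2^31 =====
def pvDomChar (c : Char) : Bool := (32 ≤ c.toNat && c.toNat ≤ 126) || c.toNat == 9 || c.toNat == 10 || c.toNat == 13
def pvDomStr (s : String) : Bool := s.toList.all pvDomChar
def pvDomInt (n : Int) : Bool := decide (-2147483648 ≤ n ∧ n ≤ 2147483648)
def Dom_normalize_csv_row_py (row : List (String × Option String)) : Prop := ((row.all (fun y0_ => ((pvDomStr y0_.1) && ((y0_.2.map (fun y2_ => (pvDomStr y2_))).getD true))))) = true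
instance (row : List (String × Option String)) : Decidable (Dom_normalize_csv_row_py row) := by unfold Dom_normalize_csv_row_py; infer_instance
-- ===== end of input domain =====

-- B replaces A's stateful per-character key loop (separator flag + strip + redundant '__'→'_' replace) by
-- extracting the maximal [a-z0-9] runs (re.findall) and joining them with '_' — idiomatic, same values.

-- ===== PORT A =====
-- _clean_text: BOM/NUL removal then strip; 'cleaned or None'
def pvCleanText (value : Option String) : Option String :=
  match value with
  | none => none
  | some v =>
    let cleaned := PySem.Str.strip (PySem.Str.replace (PySem.Str.replace v "\uFEFF" "") "\x00" "")
    if cleaned = "" then none else some cleaned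

-- the character loop of _normalize_key, with its previous_was_separator flag
def pvLoopA : List Char → Bool → List Char
  | [], _ => []
  | c :: cs, prev =>
    if PySem.Chars.isalnum c then c :: pvLoopA cs false
    else if prev = false then '_' :: pvLoopA cs true
    else pvLoopA cs prev

-- _normalize_key; the NFKD normalization + encode('ascii','ignore') step is the identity on ASCII text
-- (exact on the printable-ASCII Dom), ported as the identity
def pvNormalizeKey (value : String) : String :=
  let asciiValue := value
  let cleaned := pvLoopA (PySem.Str.lower asciiValue).toList false
  let result := PySem.Str.stripChars (String.ofList cleaned) "_"
  PySem.Str.replace result "__" "_"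

-- one iteration of A's row loop
def pvStepA (d : PySem.Dict String (Option String)) (kv : String × Option String) :
    PySem.Dict String (Option String) :=
  match pvCleanText (some kv.1) with
  | none => d
  | some cleanedKey => d.insert (pvNormalizeKey cleanedKey) (pvCleanText kv.2)

def normalize_csv_row_py (row : List (String × Option String)) : List (String × Option String) :=
  (row.foldl pvStepA PySem.Dict.empty).items

-- ===== PORT B =====
-- _clean_text of Source B (same code as A's helper)
def pvCleanTextB (value : Option String) : Option String :=
  match value with
  | none => none
  | some v =>
    let cleaned := PySem.Str.strip (PySem.Str.replace (PySem.Str.replace v "\uFEFF" "") "\x00" "")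
    if cleaned = "" then none else some cleaned

-- the regex character class [a-z0-9]
def pvTokenChar (c : Char) : Bool :=
  (decide ('a' ≤ c) && decide (c ≤ 'z')) || (decide ('0' ≤ c) && decide (c ≤ '9'))

-- re.findall(r"[a-z0-9]+", ·): the maximal runs of class characters, in order
def pvTokens : List Char → List (List Char)
  | [] => []
  | c :: cs =>
    if pvTokenChar c then
      (c :: cs.takeWhile pvTokenChar) :: pvTokens (cs.dropWhile pvTokenChar)
    else pvTokens cs
termination_by l => l.length
decreasing_by
  · have := List.length_dropWhile_le (p := pvTokenChar) (l := cs); simp; omega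
  · simp

-- _slug; the NFKD + ASCII-fold step is the identity on ASCII text (exact on the printable-ASCII Dom)
def pvSlug (value : String) : String :=
  let asciiValue := value
  String.ofList (PySem.Chars.join ['_'] (pvTokens (PySem.Str.lower asciiValue).toList))

def normalize_csv_row_py_alt (row : List (String × Option String)) : List (String × Option String) :=
  (PySem.Dict.ofList (row.filterMap (fun kv =>
    (pvCleanTextB (some kv.1)).map (fun cleanedKey => (pvSlug cleanedKey, pvCleanTextB kv.2))))).items

-- ===== PRECONDITION & SPEC =====
def Spec_normalize_csv_row_py (row : List (String × Option String)) (out : List (String × Option String)) : Prop := out = normalize_csv_row_py_alt row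
instance (row : List (String × Option String)) (out : List (String × Option String)) : Decidable (Spec_normalize_csv_row_py row out) := by unfold Spec_normalize_csv_row_py; infer_instance

-- ===== CLAIM (what is proved, stated in full; the proofs are below) =====
def Claim_equal_normalize_csv_row_py : Prop := ∀ (row : List (String × Option String)), Dom_normalize_csv_row_py row → Spec_normalize_csv_row_py row (normalize_csv_row_py row)

-- ===== LEMMAS AND PROOFS =====

-- the isalnum-based run splitter (proof device mirroring pvTokens)
def pvTokensP : List Char → List (List Char)
  | [] => []
  | c :: cs =>
    if PySem.Chars.isalnum c then
      (c :: cs.takeWhile PySem.Chars.isalnum) :: pvTokensP (cs.dropWhile PySem.Chars.isalnum)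
    else pvTokensP cs
termination_by l => l.length
decreasing_by
  · have := List.length_dropWhile_le (p := PySem.Chars.isalnum) (l := cs); simp; omega
  · simp

theorem tokensP_nil_eq : pvTokensP [] = [] := by rw [pvTokensP.eq_def]

theorem tokensP_cons (c : Char) (cs : List Char) : pvTokensP (c :: cs) =
    if PySem.Chars.isalnum c then
      (c :: cs.takeWhile PySem.Chars.isalnum) :: pvTokensP (cs.dropWhile PySem.Chars.isalnum)
    else pvTokensP cs := by rw [pvTokensP.eq_def]

-- join with a single '_' before each later token
def pvSepJoin : List (List Char) → List Char
  | [] => []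
  | t :: ts => '_' :: (t ++ pvSepJoin ts)

-- no two adjacent underscores
def pvNoDD : List Char → Bool
  | [] => true
  | [_] => true
  | a :: b :: t => !(a == '_' && b == '_') && pvNoDD (b :: t)

theorem charLe_iff (a b : Char) : (a ≤ b) ↔ a.toNat ≤ b.toNat := by
  rw [Char.le_def, UInt32.le_iff_toNat_le]; rfl

theorem tokenChar_eq_isalnum_lower (c : Char) :
    pvTokenChar (PySem.Chars.lowerChar c) = PySem.Chars.isalnum (PySem.Chars.lowerChar c) := by
  unfold PySem.Chars.lowerChar
  by_cases hu : PySem.Chars.isupper c = true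
  · simp only [hu, if_true]
    have h1 : (65:Nat) ≤ c.toNat ∧ c.toNat ≤ 90 := by
      unfold PySem.Chars.isupper at hu
      simp only [Bool.and_eq_true, decide_eq_true_eq, charLe_iff] at hu
      exact hu
    have hval : (Char.ofNat (c.toNat + 32)).toNat = c.toNat + 32 := by
      rw [Char.toNat_ofNat]
      have : (c.toNat + 32).isValidChar := by left; omega
      simp [this]
    unfold pvTokenChar PySem.Chars.isalnum PySem.Chars.isalpha PySem.Chars.isupper PySem.Chars.islower PySem.Chars.isdigit
    simp only [charLe_iff]
    simp only [show ('a').toNat = 97 from rfl, show ('z').toNat = 122 from rfl,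
      show ('A').toNat = 65 from rfl, show ('Z').toNat = 90 from rfl]
    rw [show (decide (97 ≤ (Char.ofNat (c.toNat + 32)).toNat) &&
      decide ((Char.ofNat (c.toNat + 32)).toNat ≤ 122)) = true by
        simp only [Bool.and_eq_true, decide_eq_true_eq]; omega]
    simp only [Bool.true_or, Bool.or_true]
  · simp only [hu, if_false, Bool.false_eq_true]
    unfold pvTokenChar PySem.Chars.isalnum PySem.Chars.isalpha PySem.Chars.islower PySem.Chars.isdigit
    simp only [Bool.not_eq_true] at hu
    rw [hu]; simp

theorem alnum_ne_us {c : Char} (h : PySem.Chars.isalnum c = true) : (c == '_') = false := by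
  by_cases hc : c = '_'
  · subst hc; exact absurd h (by decide)
  · simp [hc]

theorem takeWhile_congr' {p q : Char → Bool} : ∀ (l : List Char), (∀ a ∈ l, p a = q a) →
    l.takeWhile p = l.takeWhile q
  | [], _ => rfl
  | a :: l, h => by
    simp only [List.takeWhile_cons, h a (by simp)]
    cases hq : q a with
    | false => rfl
    | true => simp [takeWhile_congr' l (fun b hb => h b (by simp [hb]))]

theorem dropWhile_congr' {p q : Char → Bool} : ∀ (l : List Char), (∀ a ∈ l, p a = q a) →
    l.dropWhile p = l.dropWhile q
  | [], _ => rfl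
  | a :: l, h => by
    simp only [List.dropWhile_cons, h a (by simp)]
    cases hq : q a with
    | false => rfl
    | true => simp [dropWhile_congr' l (fun b hb => h b (by simp [hb]))]

theorem dropWhile_head_false {p : Char → Bool} :
    ∀ {l : List Char} {c : Char} {t : List Char}, List.dropWhile p l = c :: t → p c = false
  | [], _, _, h => by simp at h
  | a :: l, c, t, h => by
    rw [List.dropWhile_cons] at h
    cases ha : p a with
    | true => rw [ha] at h; simp only [if_true] at h; exact dropWhile_head_false h
    | false =>
      rw [ha] at h
      simp only [Bool.false_eq_true, if_false] at h
      cases h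
      exact ha
theorem dropWhile_all_false {p : Char → Bool} : ∀ (l : List Char), (∀ a ∈ l, p a = false) →
    l.dropWhile p = l
  | [], _ => rfl
  | a :: l, h => by
    simp [h a (by simp)]

theorem tokens_eq_tokensP (l : List Char) (h : ∀ c ∈ l, pvTokenChar c = PySem.Chars.isalnum c) :
    pvTokens l = pvTokensP l := by
  fun_induction pvTokens l with
  | case1 => rw [tokensP_nil_eq]
  | case2 c cs hc ih =>
    have hc' : PySem.Chars.isalnum c = true := by rw [← h c (by simp)]; exact hc
    have hmem : ∀ a ∈ cs, pvTokenChar a = PySem.Chars.isalnum a := fun a ha => h a (by simp [ha])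
    rw [tokensP_cons, if_pos hc', takeWhile_congr' cs hmem]
    rw [← dropWhile_congr' cs hmem]
    rw [ih (fun a ha => hmem a ((List.dropWhile_sublist _).subset ha))]
  | case3 c cs hc ih =>
    have hc' : PySem.Chars.isalnum c = false := by rw [← h c (by simp)]; simpa using hc
    rw [tokensP_cons, if_neg (by simp [hc']), ih (fun a ha => h a (by simp [ha]))]

theorem loopA_true_cons (c : Char) (cs : List Char) :
    pvLoopA (c :: cs) true = if PySem.Chars.isalnum c then c :: pvLoopA cs false else pvLoopA cs true := by
  cases h : PySem.Chars.isalnum c <;> simp [pvLoopA, h]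

theorem loopA_false_run (a r : List Char) (h : ∀ c ∈ a, PySem.Chars.isalnum c = true) :
    pvLoopA (a ++ r) false = a ++ pvLoopA r false := by
  induction a with
  | nil => rfl
  | cons c t ih =>
    simp only [List.cons_append, pvLoopA, h c (by simp), if_true]
    simp [ih (fun b hb => h b (by simp [hb]))]

theorem loopA_true_head (l : List Char) :
    pvLoopA l true = [] ∨ ∃ c t, pvLoopA l true = c :: t ∧ PySem.Chars.isalnum c = true := by
  induction l with
  | nil => left; rfl
  | cons c cs ih =>
    cases h : PySem.Chars.isalnum c with
    | true => right; exact ⟨c, pvLoopA cs false, by rw [loopA_true_cons, if_pos h], h⟩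
    | false => rw [loopA_true_cons, if_neg (by simp [h])]; exact ih

theorem loopA_true_noalnum (l : List Char) (h : ∀ c ∈ l, PySem.Chars.isalnum c = false) :
    pvLoopA l true = [] := by
  induction l with
  | nil => rfl
  | cons c cs ih =>
    rw [loopA_true_cons, if_neg (by simp [h c (by simp)])]
    exact ih (fun b hb => h b (by simp [hb]))

theorem dropWhile_us_loopA (l : List Char) :
    List.dropWhile (fun c => c == '_') (pvLoopA l false) = pvLoopA l true := by
  cases l with
  | nil => rfl
  | cons c cs =>
    cases h : PySem.Chars.isalnum c with
    | true =>
      rw [loopA_true_cons, if_pos h]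
      simp only [pvLoopA, h, if_true]
      rw [List.dropWhile_cons_of_neg (by simp [alnum_ne_us h])]
    | false =>
      rw [loopA_true_cons, if_neg (by simp [h])]
      rw [show pvLoopA (c :: cs) false = '_' :: pvLoopA cs true by simp [pvLoopA, h]]
      rw [List.dropWhile_cons_of_pos (by simp)]
      rcases loopA_true_head cs with he | ⟨d, t, he, hd⟩
      · simp [he]
      · rw [he, List.dropWhile_cons_of_neg (by simp [alnum_ne_us hd])]

theorem tokensP_nil {l : List Char} (h : pvTokensP l = []) :
    ∀ c ∈ l, PySem.Chars.isalnum c = false := by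
  fun_induction pvTokensP l with
  | case1 => intro c hc; simp at hc
  | case2 c cs hc ih => simp at h
  | case3 c cs hc ih =>
    intro b hb
    rcases List.mem_cons.mp hb with rfl | hb
    · simpa using hc
    · exact ih h b hb

theorem rstrip_append (x y : List Char)
    (h : (List.dropWhile (fun c => c == '_') y.reverse).reverse ≠ []) :
    (List.dropWhile (fun c => c == '_') (x ++ y).reverse).reverse
      = x ++ (List.dropWhile (fun c => c == '_') y.reverse).reverse := by
  rw [List.reverse_append, List.dropWhile_append]
  have h2 : (List.dropWhile (fun c => c == '_') y.reverse).isEmpty = false := by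
    cases he : List.dropWhile (fun c => c == '_') y.reverse with
    | nil => exact absurd (by simp [he]) h
    | cons a t => rfl
  rw [if_neg (by simp [h2])]
  simp

theorem tokensP_tokens (l : List Char) :
    ∀ t ∈ pvTokensP l, t ≠ [] ∧ ∀ c ∈ t, PySem.Chars.isalnum c = true := by
  fun_induction pvTokensP l with
  | case1 => intro t ht; simp at ht
  | case2 c cs hc ih =>
    intro t ht
    rcases List.mem_cons.mp ht with rfl | ht
    · refine ⟨by simp, ?_⟩
      intro b hb
      rcases List.mem_cons.mp hb with rfl | hb
      · exact hc
      · exact List.mem_takeWhile_imp hb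
    · exact ih t ht
  | case3 c cs hc ih =>
    exact ih

theorem rstrip_all (x : List Char) (h : ∀ c ∈ x, (c == '_') = false) :
    (List.dropWhile (fun c => c == '_') x.reverse).reverse = x := by
  rw [dropWhile_all_false _ (fun a ha => h a (List.mem_reverse.mp ha))]
  simp

-- the strip-both-ends of '_' on the loop output is exactly the '_'-join of the alnum runs
theorem key_strip_eq_join (l : List Char) :
    (List.dropWhile (fun c => c == '_') (pvLoopA l true).reverse).reverse
      = PySem.Chars.join ['_'] (pvTokensP l) := by
  fun_induction pvTokensP l with
  | case1 => rfl
  | case2 c cs hc ih =>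
    have hcs : cs.takeWhile PySem.Chars.isalnum ++ cs.dropWhile PySem.Chars.isalnum = cs :=
      List.takeWhile_append_dropWhile
    have hrun : pvLoopA cs false
        = cs.takeWhile PySem.Chars.isalnum ++ pvLoopA (cs.dropWhile PySem.Chars.isalnum) false := by
      conv_lhs => rw [← hcs]
      exact loopA_false_run _ _ (fun b hb => List.mem_takeWhile_imp hb)
    have halla : ∀ b ∈ c :: cs.takeWhile PySem.Chars.isalnum, PySem.Chars.isalnum b = true := by
      intro b hb
      rcases List.mem_cons.mp hb with rfl | hb
      · exact hc
      · exact List.mem_takeWhile_imp hb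
    rw [loopA_true_cons, if_pos hc, hrun]
    cases hr : cs.dropWhile PySem.Chars.isalnum with
    | nil =>
      simp only [pvLoopA, List.append_nil]
      rw [rstrip_all _ (fun b hb => alnum_ne_us (halla b hb))]
      rw [tokensP_nil_eq, PySem.Chars.join_singleton]
    | cons d r' =>
      have hd : PySem.Chars.isalnum d = false := dropWhile_head_false hr
      rw [hr] at ih
      have hblock : pvLoopA (d :: r') false = '_' :: pvLoopA r' true := by
        simp [pvLoopA, hd]
      have htirrel : pvLoopA (d :: r') true = pvLoopA r' true := by
        rw [loopA_true_cons, if_neg (by simp [hd])]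
      have htok : pvTokensP (d :: r') = pvTokensP r' := by
        rw [tokensP_cons, if_neg (by simp [hd])]
      rw [hblock, htok]
      rw [htirrel, htok] at ih
      by_cases htk : pvTokensP r' = []
      · have hnone := tokensP_nil htk
        rw [loopA_true_noalnum r' hnone, htk, PySem.Chars.join_singleton]
        rw [show (c :: (cs.takeWhile PySem.Chars.isalnum ++ '_' :: ([] : List Char)))
              = (c :: cs.takeWhile PySem.Chars.isalnum) ++ ['_'] by simp]
        rw [List.reverse_append]
        rw [show (['_'] : List Char).reverse = ['_'] from rfl]
        rw [show (['_'] : List Char) ++ (c :: cs.takeWhile PySem.Chars.isalnum).reverse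
              = '_' :: (c :: cs.takeWhile PySem.Chars.isalnum).reverse from rfl]
        rw [List.dropWhile_cons_of_pos (by simp)]
        exact rstrip_all _ (fun b hb => alnum_ne_us (halla b hb))
      · obtain ⟨t, ts, hts⟩ : ∃ t ts, pvTokensP r' = t :: ts := by
          cases h' : pvTokensP r' with
          | nil => exact absurd h' htk
          | cons t ts => exact ⟨t, ts, rfl⟩
        have hne : (List.dropWhile (fun c => c == '_') (pvLoopA r' true).reverse).reverse ≠ [] := by
          rw [ih, hts]
          rcases tokensP_tokens r' t (by rw [hts]; simp) with ⟨htne, _⟩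
          cases t with
          | nil => exact absurd rfl htne
          | cons a u =>
            cases ts with
            | nil => simp [PySem.Chars.join_singleton]
            | cons t2 ts2 => rw [PySem.Chars.join_cons_cons]; simp
        rw [show (c :: (cs.takeWhile PySem.Chars.isalnum ++ '_' :: pvLoopA r' true))
              = ((c :: cs.takeWhile PySem.Chars.isalnum) ++ ['_']) ++ pvLoopA r' true by simp]
        rw [rstrip_append _ _ hne, ih, hts, PySem.Chars.join_cons_cons]
  | case3 c cs hc ih =>
    rw [loopA_true_cons, if_neg (by simp [hc])]
    exact ih

theorem join_eq_sepJoin : ∀ ts : List (List Char),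
    PySem.Chars.join ['_'] ts = match ts with | [] => [] | t :: us => t ++ pvSepJoin us := by
  intro ts
  induction ts with
  | nil => rfl
  | cons t us ih =>
    cases us with
    | nil => simp [PySem.Chars.join_singleton, pvSepJoin]
    | cons u vs =>
      rw [PySem.Chars.join_cons_cons, ih]
      simp [pvSepJoin]

theorem nodd_cons_of {a : Char} {x : List Char} (ha : (a == '_') = false) (hx : pvNoDD x = true) :
    pvNoDD (a :: x) = true := by
  cases x with
  | nil => rfl
  | cons b y => simp [pvNoDD, ha, hx]

theorem nodd_sep : ∀ (t : List Char) (ts : List (List Char)),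
    (∀ c ∈ t, (c == '_') = false) →
    (∀ u ∈ ts, u ≠ [] ∧ ∀ c ∈ u, (c == '_') = false) →
    pvNoDD (t ++ pvSepJoin ts) = true := by
  intro t ts
  induction ts generalizing t with
  | nil =>
    intro ht _
    rw [pvSepJoin, List.append_nil]
    induction t with
    | nil => rfl
    | cons a u ihu => exact nodd_cons_of (ht a (by simp)) (ihu (fun b hb => ht b (by simp [hb])))
  | cons u us ih =>
    intro ht hts
    rw [pvSepJoin]
    rcases hts u (by simp) with ⟨hune, huc⟩
    obtain ⟨v, u', rfl⟩ : ∃ v u', u = v :: u' := by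
      cases u with
      | nil => exact absurd rfl hune
      | cons v u' => exact ⟨v, u', rfl⟩
    have hrest : pvNoDD ('_' :: ((v :: u') ++ pvSepJoin us)) = true := by
      have hin : pvNoDD ((v :: u') ++ pvSepJoin us) = true :=
        ih (v :: u') huc (fun w hw => hts w (by simp [hw]))
      have hv : (v == '_') = false := huc v (by simp)
      simp only [List.cons_append] at hin ⊢
      simp [pvNoDD, hv, hin]
    induction t with
    | nil => exact hrest
    | cons a t' iht =>
      exact nodd_cons_of (ht a (by simp))
        (iht (fun b hb => ht b (by simp [hb])))

theorem nodd_join (ts : List (List Char))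
    (h : ∀ t ∈ ts, t ≠ [] ∧ ∀ c ∈ t, (c == '_') = false) :
    pvNoDD (PySem.Chars.join ['_'] ts) = true := by
  rw [join_eq_sepJoin ts]
  cases ts with
  | nil => rfl
  | cons t us =>
    exact nodd_sep t us (fun c hc => (h t (by simp)).2 c hc) (fun u hu => h u (by simp [hu]))

theorem replace_go_id (new : List Char) (fuel : Nat) (l acc : List Char) (h : pvNoDD l = true) :
    PySem.Chars.replace.go ['_', '_'] new fuel l acc = acc.reverse ++ l := by
  induction fuel generalizing l acc with
  | zero => rw [PySem.Chars.replace.go]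
  | succ fuel ih =>
    cases l with
    | nil =>
      rw [PySem.Chars.replace.go]
      · simp
      · omega
    | cons c t =>
      have hpre : (['_', '_'] : List Char).isPrefixOf (c :: t) = false := by
        cases t with
        | nil => simp [List.isPrefixOf]
        | cons d t' =>
          simp only [pvNoDD, Bool.and_eq_true, Bool.not_eq_eq_eq_not, Bool.not_true] at h
          simp only [List.isPrefixOf, Bool.and_eq_false_iff]
          rcases Bool.and_eq_false_iff.mp h.1 with hc | hd
          · left; rw [BEq.comm]; exact hc
          · right; left; rw [BEq.comm]; exact hd
      rw [PySem.Chars.replace.go, hpre]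
      simp only [Bool.false_eq_true, if_false]
      have ht : pvNoDD t = true := by
        cases t with
        | nil => rfl
        | cons d t' =>
          simp only [pvNoDD, Bool.and_eq_true] at h
          exact h.2
      rw [ih t (c :: acc) ht]
      simp

theorem replace_id (l : List Char) (new : List Char) (h : pvNoDD l = true) :
    PySem.Chars.replace l ['_', '_'] new = l := by
  rw [PySem.Chars.replace]
  simp only [List.isEmpty_cons, Bool.false_eq_true, if_false]
  rw [replace_go_id new l.length l [] h]
  simp

theorem contains_us_eq : (fun c => List.contains ['_'] c) = (fun c : Char => c == '_') := by
  funext c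
  by_cases h : c = '_'
  · subst h; decide
  · simp [h]

theorem key_eq (v : String) : pvNormalizeKey v = pvSlug v := by
  apply String.toList_inj.mp
  simp only [pvNormalizeKey, pvSlug, PySem.Str.toList_replace, PySem.Str.toList_stripChars,
    String.toList_ofList, show ("_" : String).toList = ['_'] from rfl,
    show ("__" : String).toList = ['_', '_'] from rfl]
  rw [PySem.Chars.stripChars]
  rw [contains_us_eq]
  rw [dropWhile_us_loopA, key_strip_eq_join]
  have hmem : ∀ c ∈ (PySem.Str.lower v).toList, pvTokenChar c = PySem.Chars.isalnum c := by
    intro c hc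
    rw [PySem.Str.toList_lower, PySem.Chars.lower] at hc
    rcases List.mem_map.mp hc with ⟨d, _, rfl⟩
    exact tokenChar_eq_isalnum_lower d
  rw [← tokens_eq_tokensP _ hmem]
  apply replace_id
  apply nodd_join
  intro t ht
  rw [tokens_eq_tokensP _ hmem] at ht
  rcases tokensP_tokens _ t ht with ⟨hne, hall⟩
  exact ⟨hne, fun c hc => alnum_ne_us (hall c hc)⟩

theorem update_cons (d : PySem.Dict String (Option String)) (p : String × Option String)
    (ps : List (String × Option String)) :
    d.update (p :: ps) = (d.insert p.1 p.2).update ps := by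
  rw [PySem.Dict.update, PySem.Dict.update, List.foldl_cons]

set_option maxHeartbeats 1000000 in
theorem fold_eq (rw : List (String × Option String)) (d : PySem.Dict String (Option String)) :
    rw.foldl pvStepA d
    = d.update (rw.filterMap (fun kv =>
        (pvCleanTextB (some kv.1)).map (fun cleanedKey => (pvSlug cleanedKey, pvCleanTextB kv.2)))) := by
  have hBA : pvCleanTextB = pvCleanText := rfl
  induction rw generalizing d with
  | nil => rw [List.filterMap_nil, List.foldl_nil]; rfl
  | cons kv t ih =>
    rw [List.foldl_cons, List.filterMap_cons]
    cases h : pvCleanText (some kv.1) with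
    | none =>
      have hB : pvCleanTextB (some kv.1) = none := by rw [hBA]; exact h
      simp only [hB, Option.map_none]
      rw [show pvStepA d kv = d by simp [pvStepA, h]]
      exact ih d
    | some ck =>
      have hB : pvCleanTextB (some kv.1) = some ck := by rw [hBA]; exact h
      simp only [hB, Option.map_some]
      rw [show pvStepA d kv = d.insert (pvNormalizeKey ck) (pvCleanText kv.2) by
        simp [pvStepA, h]]
      rw [update_cons]
      have hv : pvCleanTextB kv.2 = pvCleanText kv.2 := by rw [hBA]
      rw [key_eq, ← hv]
      exact ih _

-- ===== VERDICT (by name: the statement is the Claim_ definition above) =====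
theorem normalize_csv_row_py_spec : Claim_equal_normalize_csv_row_py := by
  intro row _
  unfold Spec_normalize_csv_row_py normalize_csv_row_py normalize_csv_row_py_alt PySem.Dict.ofList
  rw [fold_eq]
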